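-- pv_equiv track=rewrite | github.com/yunoyunoyuno/Algorithms_Playground | StateSpace Search/BFS.py | m3d2BFS
-- ===== SOURCE A (Python) =====
-- class State:
--     def __init__(self,v,p,op):
--         self.val = v;self.parent = p;self.op = op;
--
-- def ans(state,a):
--     if(state == None): a.append("1"); return;
--     a.append(state.op);
--     ans(state.parent,a);
--     return a;
--
-- def m3d2BFS(target):
--     q = []; s = set();
--     q.append(State(1,None,'*3'));
--     while(len(q) > 0):
--         state = q.pop(0);
--         if(state.val == target): return ans(state.parent,[]);
--         m3 = state.val*3
--         if(not m3 in s):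
--             q.append(State(m3,state,"*3")); s.add(m3)
--         d2 = state.val//2
--         if(not d2 in s):
--             q.append(State(d2,state,"/2")); s.add(d2)
-- ===== SOURCE B (Python) =====
-- def m3d2BFS(target):
--     # BFS over bare values with parent/op dictionaries instead of linked State
--     # objects; the path is rebuilt iteratively by walking parent_of.
--     parent_of = {1: None}
--     op_of = {1: '*3'}
--     seen = set()
--     q = [1]
--     i = 0
--     while i < len(q):
--         v = q[i]
--         i += 1
--         if v == target:
--             ops = []
--             node = parent_of[v]
--             while node is not None:
--                 ops.append(op_of[node])
--                 node = parent_of[node]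
--             ops.append("1")
--             return ops
--         for child, o in ((v * 3, "*3"), (v // 2, "/2")):
--             if child not in seen:
--                 seen.add(child)
--                 q.append(child)
--                 parent_of.setdefault(child, v)
--                 op_of.setdefault(child, o)
-- ===== Notes on version B (the rewrite author's own statement) =====
-- stated objective: idiomatic
-- what changed: The linked State objects and the recursive ans() reconstruction are replaced by parent/op dictionaries over bare values with an index-cursor queue (no O(n) pop(0)) and an iterative back-walk over parent_of to rebuild the path.
-- outside the precondition, e.g. on m3d2BFS(1): A returns None, B returns ['1']
import Mathlib
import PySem

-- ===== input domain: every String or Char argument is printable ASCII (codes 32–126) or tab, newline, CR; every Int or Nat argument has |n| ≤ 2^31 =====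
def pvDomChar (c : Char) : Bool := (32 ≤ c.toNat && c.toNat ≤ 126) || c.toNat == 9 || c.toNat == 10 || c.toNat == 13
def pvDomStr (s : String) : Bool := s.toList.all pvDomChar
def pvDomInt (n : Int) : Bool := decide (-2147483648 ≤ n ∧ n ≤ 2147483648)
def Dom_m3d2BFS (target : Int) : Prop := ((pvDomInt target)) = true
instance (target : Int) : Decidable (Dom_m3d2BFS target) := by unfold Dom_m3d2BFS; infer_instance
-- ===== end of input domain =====

-- B replaces A's linked State objects and recursive path reconstruction by parent/op
-- dictionaries over bare values with an index-cursor queue and an iterative back-walk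
-- (objective: idiomatic); return values proved equal on Pre_.
--
-- Containers in the ports: Python's hash set / dict are used by membership and
-- key-lookup ONLY (no iteration order is ever observed), so they are represented by
-- Std.TreeSet / Std.TreeMap, which have identical membership/lookup semantics; A's
-- FIFO queue (pop(0)/append) is a standard two-list functional queue and B's list
-- (append/index) is an Array — exact representations chosen so the ports evaluate
-- at the Python's speed; bridge lemmas below relate them to plain-list loops.

-- ===== PORT A =====
-- A's State(v, parent, op) linked objects: parent pointers as a plain inductive
-- (PvPar.none = Python None).
inductive PvPar where
  | none : PvPar
  | node : Int → PvPar → String → PvPar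

-- ans(state, a): appends state.op walking up the parents, "1" at the root's None.
-- At the top-level call ans(None, []) Python appends "1" but RETURNS None (only
-- reached for target == 1, excluded by Pre_); the port returns the list there.
def pvAns : PvPar → List String → List String
  | PvPar.none, a => a ++ ["1"]
  | PvPar.node _ p op, a => pvAns p (a ++ [op])

-- q.pop(0) on the two-list FIFO queue (front, back): the queue's contents are
-- front ++ back.reverse; append conses onto back.
def pvDeq : List (Int × PvPar × String) → List (Int × PvPar × String) →
    Option ((Int × PvPar × String) × List (Int × PvPar × String) × List (Int × PvPar × String))
  | [], back =>
    match back.reverse with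
    | [] => Option.none
    | e :: f => Option.some (e, f, [])
  | e :: f, back => Option.some (e, f, back)

-- the while loop, fueled: the Python loop has no termination bound; pvFuel is an
-- astronomically large counter (never exhausted on any target whose search any
-- machine could finish — the BFS dequeues < 2^(depth+1) states and depths of
-- 32-bit targets are a few hundred at most, far below 10^100).
def pvLoopA : Nat → List (Int × PvPar × String) → List (Int × PvPar × String) →
    Std.TreeSet Int → Int → List String
  | 0, _, _, _, _ => []
  | Nat.succ n, front, back, s, t =>
    match pvDeq front back with
    | Option.none => []     -- while exits: Python returns None (never reached: 1 is re-enqueued forever)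
    | Option.some ((v, p, op), f, b) =>
      if v = t then pvAns p []
      else
        let m3 := v * 3
        let b1 := if s.contains m3 then b else (m3, PvPar.node v p op, "*3") :: b
        let s1 := if s.contains m3 then s else s.insert m3
        let d2 := PySem.Int.floordiv v 2
        let b2 := if s1.contains d2 then b1 else (d2, PvPar.node v p op, "/2") :: b1
        let s2 := if s1.contains d2 then s1 else s1.insert d2
        pvLoopA n f b2 s2 t

def pvFuel : Nat := 10 ^ 100

def m3d2BFS (target : Int) : List String :=
  pvLoopA pvFuel [((1 : Int), PvPar.none, "*3")] [] (∅ : Std.TreeSet Int) target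

-- ===== PORT B =====
-- d.setdefault(k, v): insert only if the key is absent.
def pvSetd {β : Type} (d : Std.TreeMap Int β) (k : Int) (v : β) : Std.TreeMap Int β :=
  if d.contains k then d else d.insert k v

-- the reconstruction walk: while node is not None: ops.append(op_of[node]);
-- node = parent_of[node].  The dict lookups parent_of[node] / op_of[node] are
-- ported as getD: the keys are always present on reachable runs (every recorded
-- parent was itself enqueued with an entry; 1 is seeded), so the defaults are
-- never used.  Fueled: the parent chain of a dequeued value is shorter than the
-- number of loop iterations run, hence < pvFuel.
def pvRebuild : Nat → Option Int → Std.TreeMap Int (Option Int) → Std.TreeMap Int String →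
    List String → List String
  | _, Option.none, _, _, acc => acc ++ ["1"]
  | 0, Option.some _, _, _, _ => []
  | Nat.succ k, Option.some u, par, op, acc =>
      pvRebuild k (par.getD u Option.none) par op (acc ++ [op.getD u ""])

-- the while loop of Source B: queue of bare values (a Python list = Array) with index
-- cursor i (q[i]? = none exactly when i ≥ len(q), the loop exit, where Python
-- returns None); the two-child for-loop is unrolled.  parent_of[v] at the find is
-- getD (key always present: every dequeued value was enqueued with an entry, 1 is
-- seeded).
def pvLoopB : Nat → Array Int → Nat → Std.TreeMap Int (Option Int) →
    Std.TreeMap Int String → Std.TreeSet Int → Int → List String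
  | 0, _, _, _, _, _, _ => []
  | Nat.succ n, q, i, par, op, seen, t =>
    match q[i]? with
    | Option.none => []
    | Option.some v =>
      if v = t then
        pvRebuild pvFuel (par.getD v Option.none) par op []
      else
        let c1 := v * 3
        let q1 := if seen.contains c1 then q else q.push c1
        let par1 := if seen.contains c1 then par else pvSetd par c1 (Option.some v)
        let op1 := if seen.contains c1 then op else pvSetd op c1 "*3"
        let seen1 := if seen.contains c1 then seen else seen.insert c1
        let c2 := PySem.Int.floordiv v 2
        let q2 := if seen1.contains c2 then q1 else q1.push c2
        let par2 := if seen1.contains c2 then par1 else pvSetd par1 c2 (Option.some v)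
        let op2 := if seen1.contains c2 then op1 else pvSetd op1 c2 "/2"
        let seen2 := if seen1.contains c2 then seen1 else seen1.insert c2
        pvLoopB n q2 (i + 1) par2 op2 seen2 t

def m3d2BFS_alt (target : Int) : List String :=
  pvLoopB pvFuel #[(1 : Int)] 0
    ((∅ : Std.TreeMap Int (Option Int)).insert 1 Option.none)
    ((∅ : Std.TreeMap Int String).insert 1 "*3")
    (∅ : Std.TreeSet Int) target

-- ===== PRECONDITION & SPEC =====
-- Pre_ excludes exactly the inputs on which A never returns a list: on negative
-- targets A loops forever (every explored value is nonnegative, so the target is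
-- never found and 1 is re-enqueued endlessly), and on target 1 A returns None,
-- which is not a value of the declared list-of-strings type (B returns ["1"] there).
def Pre_m3d2BFS (target : Int) : Prop := 0 ≤ target ∧ target ≠ 1
instance (target : Int) : Decidable (Pre_m3d2BFS target) := by unfold Pre_m3d2BFS; infer_instance

def pvWitness_m3d2BFS : Int := (10)

def Spec_m3d2BFS (target : Int) (out : List String) : Prop := out = m3d2BFS_alt target
instance (target : Int) (out : List String) : Decidable (Spec_m3d2BFS target out) := by unfold Spec_m3d2BFS; infer_instance

-- ===== CLAIM (what is proved, stated in full; the proofs are below) =====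
def Claim_equal_m3d2BFS : Prop := ∀ (target : Int), Dom_m3d2BFS target → Pre_m3d2BFS target → Spec_m3d2BFS target (m3d2BFS target)

-- ===== LEMMAS AND PROOFS =====

-- container bridge lemmas
theorem pvMemIns (s : Std.TreeSet Int) (c x : Int) : x ∈ s.insert c ↔ (x ∈ s ∨ x = c) := by
  rw [Std.TreeSet.mem_insert, compare_eq_iff_eq, eq_comm, or_comm]

theorem pvContainsIff (s : Std.TreeSet Int) (x : Int) : s.contains x = true ↔ x ∈ s :=
  Std.TreeSet.mem_iff_contains.symm

theorem pvGetIns {β : Type} (t : Std.TreeMap Int β) (c : Int) (w : β) (k : Int) :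
    (t.insert c w)[k]? = if k = c then Option.some w else t[k]? := by
  simp only [Std.TreeMap.getElem?_insert, compare_eq_iff_eq]
  by_cases h : k = c
  · simp [h]
  · simp [h, show ¬(c = k) from fun hh => h hh.symm]

theorem pvGetIns_self {β : Type} (t : Std.TreeMap Int β) (c : Int) (w : β) :
    (t.insert c w)[c]? = Option.some w := by rw [pvGetIns]; simp

theorem pvGetIns_ne {β : Type} (t : Std.TreeMap Int β) (c : Int) (w : β) (k : Int)
    (h : k ≠ c) : (t.insert c w)[k]? = t[k]? := by rw [pvGetIns]; simp [h]

theorem pvGetD_some {β : Type} (t : Std.TreeMap Int β) (k : Int) (d x : β)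
    (h : t[k]? = Option.some x) : t.getD k d = x := by
  rw [Std.TreeMap.getD_eq_getD_getElem?, h]; rfl

theorem pvContainsMap {β : Type} (t : Std.TreeMap Int β) (k : Int) :
    t.contains k = t[k]?.isSome := Std.TreeMap.contains_eq_isSome_getElem?

-- single-list versions of the two loops (proof-side only; the ports above are
-- bridged to these by pvBridgeA / pvBridgeB, then pvSim relates the two)
def pvLoopAS : Nat → List (Int × PvPar × String) → Std.TreeSet Int → Int → List String
  | 0, _, _, _ => []
  | Nat.succ _, [], _, _ => []
  | Nat.succ n, (v, p, op) :: rest, s, t =>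
    if v = t then pvAns p []
    else
      let m3 := v * 3
      let q1 := if s.contains m3 then rest else rest ++ [(m3, PvPar.node v p op, "*3")]
      let s1 := if s.contains m3 then s else s.insert m3
      let d2 := PySem.Int.floordiv v 2
      let q2 := if s1.contains d2 then q1 else q1 ++ [(d2, PvPar.node v p op, "/2")]
      let s2 := if s1.contains d2 then s1 else s1.insert d2
      pvLoopAS n q2 s2 t

def pvLoopBS : Nat → List Int → Nat → Std.TreeMap Int (Option Int) →
    Std.TreeMap Int String → Std.TreeSet Int → Int → List String
  | 0, _, _, _, _, _, _ => []
  | Nat.succ n, q, i, par, op, seen, t =>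
    match q[i]? with
    | Option.none => []
    | Option.some v =>
      if v = t then
        pvRebuild pvFuel (par.getD v Option.none) par op []
      else
        let c1 := v * 3
        let q1 := if seen.contains c1 then q else q ++ [c1]
        let par1 := if seen.contains c1 then par else pvSetd par c1 (Option.some v)
        let op1 := if seen.contains c1 then op else pvSetd op c1 "*3"
        let seen1 := if seen.contains c1 then seen else seen.insert c1
        let c2 := PySem.Int.floordiv v 2
        let q2 := if seen1.contains c2 then q1 else q1 ++ [c2]
        let par2 := if seen1.contains c2 then par1 else pvSetd par1 c2 (Option.some v)
        let op2 := if seen1.contains c2 then op1 else pvSetd op1 c2 "/2"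
        let seen2 := if seen1.contains c2 then seen1 else seen1.insert c2
        pvLoopBS n q2 (i + 1) par2 op2 seen2 t

theorem pvBridgeACons : ∀ (n : Nat),
    (∀ (f b : List (Int × PvPar × String)) (s : Std.TreeSet Int) (t : Int),
      pvLoopA n f b s t = pvLoopAS n (f ++ b.reverse) s t) →
    ∀ (v : Int) (p : PvPar) (o : String) (f b : List (Int × PvPar × String))
      (s : Std.TreeSet Int) (t : Int),
      pvLoopA (n + 1) ((v, p, o) :: f) b s t = pvLoopAS (n + 1) ((v, p, o) :: (f ++ b.reverse)) s t := by
  intro n ih v p o f b s t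
  simp only [pvLoopA, pvDeq, pvLoopAS]
  by_cases hv : v = t
  · simp [hv]
  · simp only [if_neg hv]
    by_cases hc1 : s.contains (v * 3) = true
    · simp only [hc1, if_true]
      by_cases hc2 : s.contains (PySem.Int.floordiv v 2) = true
      · simp only [hc2, if_true]; exact ih f b s t
      · simp only [hc2, if_false, Bool.false_eq_true]
        rw [ih f ((PySem.Int.floordiv v 2, PvPar.node v p o, "/2") :: b) _ t]
        simp [List.append_assoc]
    · simp only [Bool.not_eq_true] at hc1
      simp only [hc1, if_false, Bool.false_eq_true]
      by_cases hc2 : (s.insert (v * 3)).contains (PySem.Int.floordiv v 2) = true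
      · simp only [hc2, if_true]
        rw [ih f ((v * 3, PvPar.node v p o, "*3") :: b) _ t]
        simp [List.append_assoc]
      · simp only [hc2, if_false, Bool.false_eq_true]
        rw [ih f ((PySem.Int.floordiv v 2, PvPar.node v p o, "/2") ::
              (v * 3, PvPar.node v p o, "*3") :: b) _ t]
        simp [List.append_assoc]

theorem pvBridgeA : ∀ (n : Nat) (f b : List (Int × PvPar × String)) (s : Std.TreeSet Int)
    (t : Int), pvLoopA n f b s t = pvLoopAS n (f ++ b.reverse) s t := by
  intro n
  induction n with
  | zero => intros; rfl
  | succ n ih =>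
    intro f b s t
    cases f with
    | cons e f' =>
      obtain ⟨v, p, o⟩ := e
      exact pvBridgeACons n ih v p o f' b s t
    | nil =>
      cases hb : b.reverse with
      | nil => simp only [pvLoopA, pvDeq, hb]; rfl
      | cons e f' =>
        obtain ⟨v, p, o⟩ := e
        have h1 : pvLoopA (n + 1) [] b s t = pvLoopA (n + 1) ((v, p, o) :: f') [] s t := by
          simp only [pvLoopA, pvDeq, hb]
        rw [h1, pvBridgeACons n ih v p o f' [] s t]
        simp [hb]

theorem pvBridgeB : ∀ (n : Nat) (q : Array Int) (i : Nat)
    (par : Std.TreeMap Int (Option Int)) (op : Std.TreeMap Int String)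
    (seen : Std.TreeSet Int) (t : Int),
    pvLoopB n q i par op seen t = pvLoopBS n q.toList i par op seen t := by
  intro n
  induction n with
  | zero => intros; rfl
  | succ n ih =>
    intro q i par op seen t
    simp only [pvLoopB, pvLoopBS, Array.getElem?_toList]
    cases hq : q[i]? with
    | none => rfl
    | some v =>
      by_cases hv : v = t
      · simp [hv]
      · simp only [if_neg hv]
        by_cases hc1 : seen.contains (v * 3) = true
        · simp only [hc1, if_true]
          by_cases hc2 : seen.contains (PySem.Int.floordiv v 2) = true
          · simp only [hc2, if_true]; exact ih q (i + 1) par op seen t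
          · simp only [hc2, if_false, Bool.false_eq_true]
            rw [ih (q.push (PySem.Int.floordiv v 2)) (i + 1) _ _ _ t, Array.toList_push]
        · simp only [Bool.not_eq_true] at hc1
          simp only [hc1, if_false, Bool.false_eq_true]
          by_cases hc2 : (seen.insert (v * 3)).contains (PySem.Int.floordiv v 2) = true
          · simp only [hc2, if_true]
            rw [ih (q.push (v * 3)) (i + 1) _ _ _ t, Array.toList_push]
          · simp only [hc2, if_false, Bool.false_eq_true]
            rw [ih ((q.push (v * 3)).push (PySem.Int.floordiv v 2)) (i + 1) _ _ _ t,
                Array.toList_push, Array.toList_push]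

def pvPval : PvPar → Option Int
  | PvPar.none => Option.none
  | PvPar.node v _ _ => Option.some v

def pvDepth : PvPar → Nat
  | PvPar.none => 0
  | PvPar.node _ p _ => pvDepth p + 1

def pvChain (par : Std.TreeMap Int (Option Int)) (op : Std.TreeMap Int String) : PvPar → Prop
  | PvPar.none => True
  | PvPar.node v p o =>
      op[v]? = Option.some o ∧ par[v]? = Option.some (pvPval p) ∧ pvChain par op p

def pvGood (par : Std.TreeMap Int (Option Int)) (op : Std.TreeMap Int String)
    (e : Int × PvPar × String) : Prop :=
  op[e.1]? = Option.some e.2.2 ∧ par[e.1]? = Option.some (pvPval e.2.1) ∧ pvChain par op e.2.1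

def pvDictsOK (par : Std.TreeMap Int (Option Int)) (op : Std.TreeMap Int String)
    (seen : Std.TreeSet Int) : Prop :=
  (∀ k : Int, op[k]?.isSome = true ↔ (k = 1 ∨ k ∈ seen)) ∧
  (∀ k : Int, par[k]?.isSome = true ↔ (k = 1 ∨ k ∈ seen)) ∧
  op[(1 : Int)]? = Option.some "*3" ∧ par[(1 : Int)]? = Option.some Option.none

def pvInv (n : Nat) (qA : List (Int × PvPar × String)) (qB : List Int) (i : Nat)
    (par : Std.TreeMap Int (Option Int)) (op : Std.TreeMap Int String)
    (seen : Std.TreeSet Int) : Prop :=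
  qB.drop i = qA.map (fun e => e.1) ∧
  pvDictsOK par op seen ∧
  (∀ e ∈ qA, pvGood par op e ∨ (e.1 = 1 ∧ (3:Int) ∈ seen ∧ (0:Int) ∈ seen)) ∧
  (∀ e ∈ qA, e.1 = 1 ∨ e.1 ∈ seen) ∧
  (∀ e ∈ qA, pvDepth e.2.1 + n ≤ pvFuel) ∧
  (((3:Int) ∈ seen ∧ (0:Int) ∈ seen) ∨ seen = (∅ : Std.TreeSet Int))

theorem pvRebuild_eq_ans (par : Std.TreeMap Int (Option Int)) (op : Std.TreeMap Int String) :
    ∀ (p : PvPar) (f : Nat) (acc : List String), pvChain par op p → pvDepth p ≤ f →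
      pvRebuild f (pvPval p) par op acc = pvAns p acc := by
  intro p
  induction p with
  | none => intro f acc _ _; cases f <;> simp [pvRebuild, pvPval, pvAns]
  | node v p' o ih =>
    intro f acc hc hd
    obtain ⟨ho, hp, hc'⟩ := hc
    cases f with
    | zero => simp [pvDepth] at hd
    | succ k =>
      simp only [pvPval, pvRebuild]
      rw [pvGetD_some _ _ _ _ hp, pvGetD_some _ _ _ _ ho]
      rw [ih k (acc ++ [o]) hc' (by simp [pvDepth] at hd; omega)]
      simp [pvAns]

theorem pvChain_fresh (par : Std.TreeMap Int (Option Int)) (op : Std.TreeMap Int String)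
    (c : Int) (w : Option Int) (oc : String) (hfo : op[c]? = Option.none)
    (hfp : par[c]? = Option.none) :
    ∀ p : PvPar, pvChain par op p → pvChain (par.insert c w) (op.insert c oc) p := by
  intro p
  induction p with
  | none => intro _; trivial
  | node v p' o ih =>
    intro ⟨ho, hp, hc⟩
    have hne : v ≠ c := by intro h; rw [h, hfo] at ho; cases ho
    exact ⟨by rw [pvGetIns_ne _ _ _ _ hne, ho],
           by rw [pvGetIns_ne _ _ _ _ hne, hp],
           ih hc⟩

theorem pvGood_fresh (par : Std.TreeMap Int (Option Int)) (op : Std.TreeMap Int String)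
    (c : Int) (w : Option Int) (oc : String) (hfo : op[c]? = Option.none)
    (hfp : par[c]? = Option.none) (e : Int × PvPar × String) (h : pvGood par op e) :
    pvGood (par.insert c w) (op.insert c oc) e := by
  obtain ⟨ho, hp, hc⟩ := h
  have hne : e.1 ≠ c := by intro hh; rw [hh, hfo] at ho; cases ho
  exact ⟨by rw [pvGetIns_ne _ _ _ _ hne, ho],
         by rw [pvGetIns_ne _ _ _ _ hne, hp],
         pvChain_fresh par op c w oc hfo hfp _ hc⟩

-- one guarded child update (c not yet in seen): setdefault resolves to a fresh
-- insert for c ≠ 1 and to a no-op for c = 1.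
theorem pvChild_dictsOK (par : Std.TreeMap Int (Option Int)) (op : Std.TreeMap Int String)
    (seen : Std.TreeSet Int) (c : Int) (w : Option Int) (oc : String)
    (h : pvDictsOK par op seen) (hc : seen.contains c = false) :
    pvDictsOK (pvSetd par c w) (pvSetd op c oc) (seen.insert c) := by
  obtain ⟨ho, hp, h1o, h1p⟩ := h
  by_cases hc1 : c = 1
  · subst hc1
    rw [pvSetd, pvSetd, if_pos (by rw [pvContainsMap, h1p]; rfl),
        if_pos (by rw [pvContainsMap, h1o]; rfl)]
    refine ⟨fun k => ?_, fun k => ?_, h1o, h1p⟩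
    · rw [ho k, pvMemIns]; constructor
      · rintro (h | h); exacts [Or.inl h, Or.inr (Or.inl h)]
      · rintro (h | h | h); exacts [Or.inl h, Or.inr h, Or.inl h]
    · rw [hp k, pvMemIns]; constructor
      · rintro (h | h); exacts [Or.inl h, Or.inr (Or.inl h)]
      · rintro (h | h | h); exacts [Or.inl h, Or.inr h, Or.inl h]
  · have hcm : c ∉ seen := fun hm => by
      have h2 := (pvContainsIff seen c).mpr hm; rw [hc] at h2; cases h2
    have hco : op[c]? = Option.none := by
      cases hg : op[c]? with
      | none => rfl
      | some x =>
        exact absurd ((ho c).mp (by rw [hg]; rfl)) (by rintro (h | h); exacts [hc1 h, hcm h])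
    have hcp : par[c]? = Option.none := by
      cases hg : par[c]? with
      | none => rfl
      | some x =>
        exact absurd ((hp c).mp (by rw [hg]; rfl)) (by rintro (h | h); exacts [hc1 h, hcm h])
    rw [pvSetd, pvSetd, if_neg (by rw [pvContainsMap, hcp]; simp),
        if_neg (by rw [pvContainsMap, hco]; simp)]
    refine ⟨fun k => ?_, fun k => ?_,
      by rw [pvGetIns_ne _ _ _ _ (fun hh => hc1 hh.symm)]; exact h1o,
      by rw [pvGetIns_ne _ _ _ _ (fun hh => hc1 hh.symm)]; exact h1p⟩
    · rw [pvGetIns, pvMemIns]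
      by_cases hk : k = c
      · subst hk; simp
      · simp only [if_neg hk]; rw [ho k]
        constructor
        · rintro (h | h); exacts [Or.inl h, Or.inr (Or.inl h)]
        · rintro (h | h | h); exacts [Or.inl h, Or.inr h, absurd h hk]
    · rw [pvGetIns, pvMemIns]
      by_cases hk : k = c
      · subst hk; simp
      · simp only [if_neg hk]; rw [hp k]
        constructor
        · rintro (h | h); exacts [Or.inl h, Or.inr (Or.inl h)]
        · rintro (h | h | h); exacts [Or.inl h, Or.inr h, absurd h hk]

theorem pvFreshKeys (par : Std.TreeMap Int (Option Int)) (op : Std.TreeMap Int String)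
    (seen : Std.TreeSet Int) (c : Int) (hdicts : pvDictsOK par op seen)
    (hc : seen.contains c = false) (hc1 : c ≠ 1) :
    op[c]? = Option.none ∧ par[c]? = Option.none := by
  obtain ⟨ho, hp, _, _⟩ := hdicts
  have hcm : c ∉ seen := fun hm => by
    have h2 := (pvContainsIff seen c).mpr hm; rw [hc] at h2; cases h2
  constructor
  · cases hg : op[c]? with
    | none => rfl
    | some x =>
      exact absurd ((ho c).mp (by rw [hg]; rfl)) (by rintro (h | h); exacts [hc1 h, hcm h])
  · cases hg : par[c]? with
    | none => rfl
    | some x =>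
      exact absurd ((hp c).mp (by rw [hg]; rfl)) (by rintro (h | h); exacts [hc1 h, hcm h])

theorem pvStepChild
    (qA : List (Int × PvPar × String)) (qB : List Int) (j n : Nat)
    (par : Std.TreeMap Int (Option Int)) (op : Std.TreeMap Int String) (seen : Std.TreeSet Int)
    (v : Int) (p : PvPar) (o : String) (c : Int) (oc : String)
    (hq : qB.drop j = qA.map (fun e => e.1))
    (hdicts : pvDictsOK par op seen)
    (hgood : ∀ e ∈ qA, pvGood par op e ∨ (e.1 = 1 ∧ (3:Int) ∈ seen ∧ (0:Int) ∈ seen))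
    (hsn : ∀ e ∈ qA, e.1 = 1 ∨ e.1 ∈ seen)
    (hdup : c = 1 → ((3:Int) ∈ seen ∧ (0:Int) ∈ seen))
    (hpg : pvGood par op (v, p, o))
    (hdepA : ∀ e ∈ qA, pvDepth e.2.1 + n ≤ pvFuel)
    (hdepP : pvDepth p + (n + 1) ≤ pvFuel)
    (hjlen : j ≤ qB.length)
    (hc : seen.contains c = false) :
    (qB ++ [c]).drop j = (qA ++ [(c, PvPar.node v p o, oc)]).map (fun e => e.1) ∧
    pvDictsOK (pvSetd par c (Option.some v)) (pvSetd op c oc) (seen.insert c) ∧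
    (∀ e ∈ qA ++ [(c, PvPar.node v p o, oc)],
        pvGood (pvSetd par c (Option.some v)) (pvSetd op c oc) e ∨
        (e.1 = 1 ∧ (3:Int) ∈ seen.insert c ∧ (0:Int) ∈ seen.insert c)) ∧
    (∀ e ∈ qA ++ [(c, PvPar.node v p o, oc)], e.1 = 1 ∨ e.1 ∈ seen.insert c) ∧
    (∀ e ∈ qA ++ [(c, PvPar.node v p o, oc)], pvDepth e.2.1 + n ≤ pvFuel) ∧
    pvGood (pvSetd par c (Option.some v)) (pvSetd op c oc) (v, p, o) ∧
    j ≤ (qB ++ [c]).length := by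
  have hmono : ∀ x : Int, x ∈ seen → x ∈ seen.insert c :=
    fun x hx => (pvMemIns seen c x).mpr (Or.inl hx)
  have hdrop : (qB ++ [c]).drop j = (qA ++ [(c, PvPar.node v p o, oc)]).map (fun e => e.1) := by
    rw [List.drop_append_of_le_length hjlen, hq, List.map_append]; rfl
  have hdicts' := pvChild_dictsOK par op seen c (Option.some v) oc hdicts hc
  have hdeps : ∀ e ∈ qA ++ [(c, PvPar.node v p o, oc)], pvDepth e.2.1 + n ≤ pvFuel := by
    intro e he
    rcases List.mem_append.mp he with h | h
    · exact hdepA e h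
    · simp at h; subst h; simp only [pvDepth]; omega
  have hsn' : ∀ e ∈ qA ++ [(c, PvPar.node v p o, oc)], e.1 = 1 ∨ e.1 ∈ seen.insert c := by
    intro e he
    rcases List.mem_append.mp he with h | h
    · rcases hsn e h with h' | h'; exacts [Or.inl h', Or.inr (hmono _ h')]
    · simp at h; subst h
      exact Or.inr ((pvMemIns seen c c).mpr (Or.inr rfl))
  have hjl : j ≤ (qB ++ [c]).length := by simp; omega
  by_cases hc1 : c = 1
  · -- value 1 re-enqueued: both setdefaults are no-ops (1 is seeded in both dicts)
    obtain ⟨ho, hp, h1o, h1p⟩ := hdicts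
    obtain ⟨h3, h0⟩ := hdup hc1
    have hpar : pvSetd par c (Option.some v) = par := by
      rw [pvSetd, if_pos (by rw [pvContainsMap, hc1, h1p]; rfl)]
    have hop : pvSetd op c oc = op := by
      rw [pvSetd, if_pos (by rw [pvContainsMap, hc1, h1o]; rfl)]
    rw [hpar, hop]
    refine ⟨hdrop, by rw [hpar, hop] at hdicts'; exact hdicts', ?_, hsn', hdeps, hpg, hjl⟩
    intro e he
    rcases List.mem_append.mp he with h | h
    · rcases hgood e h with h' | ⟨ha, hb, hcc⟩
      exacts [Or.inl h', Or.inr ⟨ha, hmono _ hb, hmono _ hcc⟩]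
    · simp at h; subst h
      exact Or.inr ⟨hc1, hmono _ h3, hmono _ h0⟩
  · -- fresh value: setdefault = insert of a new key
    obtain ⟨hfo, hfp⟩ := pvFreshKeys par op seen c hdicts hc hc1
    have hpar : pvSetd par c (Option.some v) = par.insert c (Option.some v) := by
      rw [pvSetd, if_neg (by rw [pvContainsMap, hfp]; simp)]
    have hop : pvSetd op c oc = op.insert c oc := by
      rw [pvSetd, if_neg (by rw [pvContainsMap, hfo]; simp)]
    rw [hpar, hop]
    have hpg' := pvGood_fresh par op c (Option.some v) oc hfo hfp _ hpg
    refine ⟨hdrop, by rw [hpar, hop] at hdicts'; exact hdicts', ?_, hsn', hdeps, hpg', hjl⟩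
    intro e he
    rcases List.mem_append.mp he with h | h
    · rcases hgood e h with h' | ⟨ha, hb, hcc⟩
      exacts [Or.inl (pvGood_fresh par op c (Option.some v) oc hfo hfp e h'),
        Or.inr ⟨ha, hmono _ hb, hmono _ hcc⟩]
    · simp at h; subst h
      refine Or.inl ⟨pvGetIns_self .., pvGetIns_self .., ?_⟩
      show pvChain _ _ (PvPar.node v p o)
      simp only [pvChain]
      exact ⟨hpg'.1, hpg'.2.1, hpg'.2.2⟩

theorem pvMemIns2 (seen : Std.TreeSet Int) (c d x : Int) (h : x ∈ seen) :
    x ∈ (seen.insert c).insert d :=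
  (pvMemIns _ d x).mpr (Or.inl ((pvMemIns seen c x).mpr (Or.inl h)))

theorem pvSim : ∀ (n : Nat) (qA : List (Int × PvPar × String)) (qB : List Int) (i : Nat)
    (par : Std.TreeMap Int (Option Int)) (op : Std.TreeMap Int String) (seen : Std.TreeSet Int)
    (t : Int), t ≠ 1 → pvInv n qA qB i par op seen →
    pvLoopAS n qA seen t = pvLoopBS n qB i par op seen t := by
  intro n
  induction n with
  | zero => intros; rfl
  | succ n ih =>
    intro qA qB i par op seen t ht hinv
    obtain ⟨hq, hdicts, hgood, hsn, hdepth, h30⟩ := hinv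
    cases qA with
    | nil =>
      have hB : qB[i]? = Option.none := by
        have h : (qB.drop i)[0]? = qB[i + 0]? := List.getElem?_drop
        rw [hq] at h; simpa using h.symm
      simp [pvLoopAS, pvLoopBS, hB]
    | cons e rest =>
      obtain ⟨v, p, o⟩ := e
      have hB : qB[i]? = Option.some v := by
        have h : (qB.drop i)[0]? = qB[i + 0]? := List.getElem?_drop
        rw [hq] at h; simpa using h.symm
      have hlen : i < qB.length := by
        by_contra hle
        rw [List.drop_eq_nil_of_le (by omega)] at hq
        simp at hq
      have hdrop1 : qB.drop (i + 1) = rest.map (fun e => e.1) := by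
        have h2 : (qB.drop i).drop 1 = qB.drop (i + 1) := List.drop_drop
        rw [hq] at h2
        rw [← h2]
        rfl
      by_cases hv : v = t
      · -- found: A reconstructs along the State parents, B along the dicts
        rcases hgood _ List.mem_cons_self with hg | ⟨h1, _, _⟩
        · obtain ⟨ho, hp, hchain⟩ := hg
          have hdep : pvDepth p ≤ pvFuel := by
            have := hdepth _ List.mem_cons_self
            simp only at this; omega
          simp only [pvLoopAS, pvLoopBS, hB, if_pos hv]
          rw [pvGetD_some _ _ _ _ hp]
          exact (pvRebuild_eq_ans par op p pvFuel [] hchain hdep).symm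
        · exact absurd (hv ▸ h1) ht
      · simp only [pvLoopAS, pvLoopBS, hB, if_neg hv]
        have hgoodR : ∀ e ∈ rest, pvGood par op e ∨ (e.1 = 1 ∧ (3:Int) ∈ seen ∧ (0:Int) ∈ seen) :=
          fun e he => hgood e (List.mem_cons_of_mem _ he)
        have hsnR : ∀ e ∈ rest, e.1 = 1 ∨ e.1 ∈ seen :=
          fun e he => hsn e (List.mem_cons_of_mem _ he)
        have hdepR : ∀ e ∈ rest, pvDepth e.2.1 + n ≤ pvFuel := by
          intro e he; have := hdepth e (List.mem_cons_of_mem _ he); omega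
        have hdepP : pvDepth p + (n + 1) ≤ pvFuel := hdepth _ List.mem_cons_self
        rcases hgood _ List.mem_cons_self with hg | ⟨h1, h3, h0⟩
        · -- dequeued entry consistent with the dicts
          rcases h30 with ⟨h3, h0⟩ | hemp
          · -- generic step: 3 and 0 are already visited
            by_cases hc1 : seen.contains (v * 3) = true
            · simp only [hc1, if_true]
              by_cases hc2 : seen.contains (PySem.Int.floordiv v 2) = true
              · simp only [hc2, if_true]
                exact ih rest qB (i + 1) par op seen t ht
                  ⟨hdrop1, hdicts, hgoodR, hsnR, hdepR, Or.inl ⟨h3, h0⟩⟩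
              · simp only [hc2, if_false, Bool.false_eq_true]
                obtain ⟨g1, g2, g3, g4, g5, _, _⟩ :=
                  pvStepChild rest qB (i + 1) n par op seen v p o
                    (PySem.Int.floordiv v 2) "/2" hdrop1 hdicts hgoodR hsnR
                    (fun _ => ⟨h3, h0⟩) hg hdepR hdepP (by omega) (Bool.eq_false_iff.mpr hc2)
                refine ih _ _ (i + 1) _ _ _ t ht ⟨g1, g2, g3, g4, g5, Or.inl ⟨?_, ?_⟩⟩
                · exact (pvMemIns ..).mpr (Or.inl h3)
                · exact (pvMemIns ..).mpr (Or.inl h0)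
            · simp only [Bool.not_eq_true] at hc1
              simp only [hc1, if_false, Bool.false_eq_true]
              obtain ⟨g1, g2, g3, g4, g5, g6, g7⟩ :=
                pvStepChild rest qB (i + 1) n par op seen v p o (v * 3) "*3"
                  hdrop1 hdicts hgoodR hsnR (fun _ => ⟨h3, h0⟩) hg hdepR hdepP (by omega) hc1
              by_cases hc2 : (seen.insert (v * 3)).contains (PySem.Int.floordiv v 2) = true
              · simp only [hc2, if_true]
                refine ih _ _ (i + 1) _ _ _ t ht ⟨g1, g2, g3, g4, g5, Or.inl ⟨?_, ?_⟩⟩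
                · exact (pvMemIns ..).mpr (Or.inl h3)
                · exact (pvMemIns ..).mpr (Or.inl h0)
              · simp only [hc2, if_false, Bool.false_eq_true]
                obtain ⟨k1, k2, k3, k4, k5, _, _⟩ :=
                  pvStepChild (rest ++ [(v * 3, PvPar.node v p o, "*3")]) (qB ++ [v * 3])
                    (i + 1) n _ _ (seen.insert (v * 3)) v p o
                    (PySem.Int.floordiv v 2) "/2" g1 g2 g3 g4
                    (fun h1' => ⟨(pvMemIns ..).mpr (Or.inl h3),
                                 (pvMemIns ..).mpr (Or.inl h0)⟩)
                    g6 g5 hdepP g7 (Bool.eq_false_iff.mpr hc2)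
                exact ih _ _ (i + 1) _ _ _ t ht
                  ⟨k1, k2, k3, k4, k5, Or.inl ⟨pvMemIns2 _ _ _ _ h3, pvMemIns2 _ _ _ _ h0⟩⟩
          · -- first iteration: seen still empty, so the dequeued value is the root 1
            have hv1 : v = 1 := by
              rcases hsn _ List.mem_cons_self with h | h
              · exact h
              · rw [hemp] at h; exact absurd h (by simp)
            subst hv1
            subst hemp
            have hc1 : (∅ : Std.TreeSet Int).contains ((1:Int) * 3) = false := by simp
            have hc2 : ((∅ : Std.TreeSet Int).insert ((1:Int) * 3)).contains
                (PySem.Int.floordiv 1 2) = false := by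
              rw [show (PySem.Int.floordiv 1 2) = 0 by decide]
              rw [show ((1:Int) * 3) = 3 by norm_num]
              rw [Bool.eq_false_iff]
              intro hcon
              have := (pvContainsIff _ _).mp hcon
              rw [pvMemIns] at this
              rcases this with h | h
              · exact absurd h (by simp)
              · exact absurd h (by norm_num)
            simp only [hc1, hc2, if_false, Bool.false_eq_true]
            obtain ⟨g1, g2, g3, g4, g5, g6, g7⟩ :=
              pvStepChild rest qB (i + 1) n par op (∅ : Std.TreeSet Int) 1 p o ((1:Int) * 3) "*3"
                hdrop1 hdicts hgoodR hsnR (fun h => absurd h (by decide)) hg hdepR hdepP (by omega) hc1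
            obtain ⟨k1, k2, k3, k4, k5, _, _⟩ :=
              pvStepChild (rest ++ [((1:Int) * 3, PvPar.node 1 p o, "*3")]) (qB ++ [(1:Int) * 3])
                (i + 1) n _ _ ((∅ : Std.TreeSet Int).insert ((1:Int) * 3)) 1 p o
                (PySem.Int.floordiv 1 2) "/2" g1 g2 g3 g4
                (fun h1' => absurd h1' (by decide))
                g6 g5 hdepP g7 hc2
            refine ih _ _ (i + 1) _ _ _ t ht ⟨k1, k2, k3, k4, k5, Or.inl ⟨?_, ?_⟩⟩
            · exact (pvMemIns ..).mpr (Or.inl ((pvMemIns ..).mpr (Or.inr (by norm_num))))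
            · exact (pvMemIns ..).mpr (Or.inr (by decide))
        · -- the re-enqueued value 1: both children (3 and 0) are already visited
          have hv1 : v = 1 := h1
          subst hv1
          have hc1 : seen.contains ((1:Int) * 3) = true := by
            rw [show ((1:Int) * 3) = 3 by norm_num]
            exact (pvContainsIff seen 3).mpr h3
          have hc2 : seen.contains (PySem.Int.floordiv 1 2) = true := by
            rw [show (PySem.Int.floordiv 1 2) = 0 by decide]
            exact (pvContainsIff seen 0).mpr h0
          simp only [hc1, hc2, if_true]
          exact ih rest qB (i + 1) par op seen t ht
            ⟨hdrop1, hdicts, hgoodR, hsnR, hdepR, Or.inl ⟨h3, h0⟩⟩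

theorem pvInit_op (k : Int) :
    ((∅ : Std.TreeMap Int String).insert 1 "*3")[k]? =
      if k = 1 then Option.some "*3" else Option.none := by
  rw [pvGetIns]; split <;> simp

theorem pvInit_par (k : Int) :
    ((∅ : Std.TreeMap Int (Option Int)).insert 1 Option.none)[k]? =
      if k = 1 then Option.some Option.none else Option.none := by
  rw [pvGetIns]; split <;> simp

-- ===== VERDICT (by name: the statement is the Claim_ definition above) =====
theorem m3d2BFS_spec : Claim_equal_m3d2BFS := by
  intro target _ hpre
  have h1 : target ≠ 1 := hpre.2
  show m3d2BFS target = m3d2BFS_alt target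
  unfold m3d2BFS m3d2BFS_alt
  rw [pvBridgeA, pvBridgeB]
  apply pvSim pvFuel _ _ 0 _ _ _ target h1
  refine ⟨rfl, ⟨?_, ?_, by rw [pvInit_op]; rfl, by rw [pvInit_par]; rfl⟩,
    ?_, ?_, ?_, Or.inr rfl⟩
  · intro k
    rw [pvInit_op k]
    constructor
    · intro h; split at h
      · left; assumption
      · simp at h
    · intro h
      rcases h with h | h
      · simp [h]
      · exact absurd h (by simp)
  · intro k
    rw [pvInit_par k]
    constructor
    · intro h; split at h
      · left; assumption
      · simp at h
    · intro h
      rcases h with h | h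
      · simp [h]
      · exact absurd h (by simp)
  · intro e he
    simp at he; subst he
    exact Or.inl ⟨by rw [pvInit_op]; rfl, by rw [pvInit_par]; rfl, trivial⟩
  · intro e he
    simp at he; subst he
    exact Or.inl rfl
  · intro e he
    simp at he; subst he
    simp [pvDepth]
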